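-- pv_equiv track=rewrite | github.com/ayeshadev283-max/backend | src/services/chunking.py | _get_overlap_paragraphs
-- ===== SOURCE A (Python) =====
-- from typing import List, Dict, Any
--
-- def _get_overlap_paragraphs(
--
--     paragraphs: List[str],
--     overlap_words: int
-- ) -> List[str]:
--     """Get paragraphs for overlap from end of chunk."""
--     overlap_paragraphs = []
--     word_count = 0
--
--     for paragraph in reversed(paragraphs):
--         paragraph_words = len(paragraph.split())
--         if word_count + paragraph_words <= overlap_words:
--             overlap_paragraphs.insert(0, paragraph)
--             word_count += paragraph_words
--         else:
--             break
--
--     return overlap_paragraphs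
-- ===== SOURCE B (Python) =====
-- from typing import List
--
-- def _get_overlap_paragraphs(paragraphs: List[str], overlap_words: int) -> List[str]:
--     """Get paragraphs for overlap from end of chunk.
--
--     The suffix paragraphs[i:] fits the budget iff prefix[i] >= total - overlap_words,
--     where prefix is the (nondecreasing) running word count; the least such i is
--     found by binary search, so no greedy scan from the end is needed.
--     """
--     prefix = [0]
--     for p in paragraphs:
--         prefix.append(prefix[-1] + len(p.split()))
--     total = prefix[-1]
--     x = total - overlap_words
--     lo, hi = 0, len(prefix)
--     while lo < hi:
--         mid = (lo + hi) // 2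
--         if prefix[mid] < x:
--             lo = mid + 1
--         else:
--             hi = mid
--     return paragraphs[lo:]
-- ===== Notes on version B (the rewrite author's own statement) =====
-- stated objective: faster
-- what changed: Replaces A's greedy reversed scan with repeated insert(0) by a prefix-sum array of word counts plus a binary search for the least suffix start whose remaining word total fits the budget (correct because word counts are nonnegative, so prefix sums are nondecreasing), returning a tail slice.
import Mathlib
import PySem

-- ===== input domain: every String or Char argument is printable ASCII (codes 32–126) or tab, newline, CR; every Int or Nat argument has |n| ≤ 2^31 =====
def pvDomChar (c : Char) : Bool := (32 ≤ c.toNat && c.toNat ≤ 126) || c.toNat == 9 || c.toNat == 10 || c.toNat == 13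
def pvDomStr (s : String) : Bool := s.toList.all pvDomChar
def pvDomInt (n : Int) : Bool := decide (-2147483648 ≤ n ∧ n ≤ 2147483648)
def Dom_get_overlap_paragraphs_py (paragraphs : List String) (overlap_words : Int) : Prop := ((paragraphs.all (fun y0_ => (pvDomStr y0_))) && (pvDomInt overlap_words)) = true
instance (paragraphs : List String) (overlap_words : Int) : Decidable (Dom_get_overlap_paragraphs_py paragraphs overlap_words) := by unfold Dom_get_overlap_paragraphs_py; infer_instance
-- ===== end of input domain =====

-- B replaces A's greedy reversed scan with insert(0) by prefix word-count sums plus a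
-- binary search for the least suffix start that fits the budget (alternative algorithm).

-- len(p.split()) as an Int (shared by both ports)
def pvWC (p : String) : Int := ((PySem.Str.split₀ p).length : Int)

-- ===== PORT A =====
-- the `for paragraph in reversed(paragraphs): … else: break` loop with state (overlap_paragraphs, word_count)
def pvALoop (ow : Int) : List String → List String → Int → List String
  | [], acc, _ => acc
  | p :: rest, acc, wc =>
    if wc + pvWC p ≤ ow then pvALoop ow rest (p :: acc) (wc + pvWC p) else acc

def get_overlap_paragraphs_py (paragraphs : List String) (overlap_words : Int) : List String :=
  pvALoop overlap_words paragraphs.reverse [] 0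

-- ===== PORT B =====
-- the `while lo < hi` binary-search loop of Source B
def pvBisectLeft (a : List Int) (x : Int) (lo hi : Nat) : Nat :=
  if _h : lo < hi then
    let mid := (lo + hi) / 2
    if a.getD mid 0 < x then pvBisectLeft a x (mid + 1) hi
    else pvBisectLeft a x lo mid
  else lo
termination_by hi - lo
decreasing_by all_goals omega

def get_overlap_paragraphs_py_alt (paragraphs : List String) (overlap_words : Int) : List String :=
  -- prefix = [0]; for p in paragraphs: prefix.append(prefix[-1] + len(p.split()))
  let pref := List.scanl (fun s p => s + pvWC p) 0 paragraphs
  -- total = prefix[-1]  (exact: pref is nonempty, so prefix[-1] is its last element)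
  let total := pref.getD (pref.length - 1) 0
  let lo := pvBisectLeft pref (total - overlap_words) 0 pref.length
  -- return paragraphs[lo:]  (lo : Nat, so the slice is a plain drop)
  paragraphs.drop lo

-- ===== PRECONDITION & SPEC =====
def Spec_get_overlap_paragraphs_py (paragraphs : List String) (overlap_words : Int) (out : List String) : Prop := out = get_overlap_paragraphs_py_alt paragraphs overlap_words
instance (paragraphs : List String) (overlap_words : Int) (out : List String) : Decidable (Spec_get_overlap_paragraphs_py paragraphs overlap_words out) := by unfold Spec_get_overlap_paragraphs_py; infer_instance

-- ===== CLAIM (what is proved, stated in full; the proofs are below) =====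
def Claim_equal_get_overlap_paragraphs_py : Prop := ∀ (paragraphs : List String) (overlap_words : Int), Dom_get_overlap_paragraphs_py paragraphs overlap_words → Spec_get_overlap_paragraphs_py paragraphs overlap_words (get_overlap_paragraphs_py paragraphs overlap_words)

-- ===== LEMMAS AND PROOFS =====

-- word count of the first j paragraphs of l
def pvP (l : List String) (j : Nat) : Int := ((l.take j).map pvWC).sum

-- greedy count of trailing kept paragraphs (proof-side characterisation of A's loop)
def pvBCount (ow : Int) : List String → Int → Nat
  | [], _ => 0
  | p :: rest, t =>
    if t + pvWC p ≤ ow then pvBCount ow rest (t + pvWC p) + 1 else 0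

theorem pvWC_nonneg (p : String) : 0 ≤ pvWC p := Int.natCast_nonneg _

theorem pvP_zero (l : List String) : pvP l 0 = 0 := by simp [pvP]

theorem pvP_mono (l : List String) {i j : Nat} (h : i ≤ j) : pvP l i ≤ pvP l j := by
  unfold pvP
  obtain ⟨d, rfl⟩ := Nat.exists_eq_add_of_le h
  rw [List.take_add, List.map_append, List.sum_append]
  have : 0 ≤ (((l.drop i).take d).map pvWC).sum :=
    List.sum_nonneg (by intro x hx; obtain ⟨p, _, rfl⟩ := List.mem_map.1 hx; exact pvWC_nonneg p)
  omega

theorem pvScanl_getD (l : List String) (s : Int) (j : Nat) (hj : j ≤ l.length) :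
    (List.scanl (fun s p => s + pvWC p) s l).getD j 0 = s + pvP l j := by
  induction l generalizing s j with
  | nil => simp at hj; simp [hj, pvP]
  | cons p rest ih =>
    cases j with
    | zero => simp [pvP]
    | succ j =>
      simp only [List.scanl_cons, List.getD_cons_succ]
      rw [ih (s + pvWC p) j (by simpa using hj)]
      simp [pvP, List.take_succ_cons]
      ring

theorem pvBisect_aux (a : List Int) (x : Int)
    (mono : ∀ i j, i ≤ j → j < a.length → a.getD i 0 ≤ a.getD j 0) :
    ∀ d lo hi, hi - lo ≤ d → hi ≤ a.length → lo ≤ hi →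
    (∀ j, j < lo → a.getD j 0 < x) →
    (∀ j, hi ≤ j → j < a.length → x ≤ a.getD j 0) →
    (∀ j, j < pvBisectLeft a x lo hi → a.getD j 0 < x) ∧
    (∀ j, pvBisectLeft a x lo hi ≤ j → j < a.length → x ≤ a.getD j 0) ∧
    pvBisectLeft a x lo hi ≤ a.length := by
  intro d
  induction d with
  | zero =>
    intro lo hi hd
    intro hhi hlohi hlo hhi2
    have heq : lo = hi := by omega
    rw [pvBisectLeft, dif_neg (by omega : ¬ lo < hi)]
    exact ⟨hlo, fun j hj hjl => hhi2 j (by omega) hjl, by omega⟩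
  | succ d IH =>
    intro lo hi hd hhi hlohi hlo hhi2
    rw [pvBisectLeft]
    by_cases h : lo < hi
    · simp only [h, dif_pos]
      have hm1 : lo ≤ (lo + hi) / 2 := by omega
      have hm2 : (lo + hi) / 2 < hi := by omega
      by_cases hc : a.getD ((lo + hi) / 2) 0 < x
      · simp only [hc, if_pos]
        exact IH ((lo + hi) / 2 + 1) hi (by omega) hhi (by omega)
          (fun j hj => lt_of_le_of_lt (mono j ((lo + hi) / 2) (by omega) (by omega)) hc) hhi2
      · simp only [hc, if_neg, not_false_iff]
        push_neg at hc
        exact IH lo ((lo + hi) / 2) (by omega) (by omega) (by omega) hlo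
          (fun j hj hjl => le_trans hc (mono ((lo + hi) / 2) j hj hjl))
    · simp only [h, dif_neg, not_false_iff]
      have : lo = hi := by omega
      subst this
      exact ⟨hlo, hhi2, hhi⟩

theorem pvBisect_spec (a : List Int) (x : Int)
    (mono : ∀ i j, i ≤ j → j < a.length → a.getD i 0 ≤ a.getD j 0)
    (lo hi : Nat) (hhi : hi ≤ a.length) (hlohi : lo ≤ hi)
    (hlo : ∀ j, j < lo → a.getD j 0 < x)
    (hhi2 : ∀ j, hi ≤ j → j < a.length → x ≤ a.getD j 0) :
    (∀ j, j < pvBisectLeft a x lo hi → a.getD j 0 < x) ∧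
    (∀ j, pvBisectLeft a x lo hi ≤ j → j < a.length → x ≤ a.getD j 0) ∧
    pvBisectLeft a x lo hi ≤ a.length :=
  pvBisect_aux a x mono (hi - lo) lo hi (le_refl _) hhi hlohi hlo hhi2

theorem pvBCount_spec (ow : Int) (l : List String) (t : Int) :
    pvBCount ow l t ≤ l.length ∧
    (pvBCount ow l t = 0 ∨ t + pvP l (pvBCount ow l t) ≤ ow) ∧
    (pvBCount ow l t = l.length ∨ ow < t + pvP l (pvBCount ow l t + 1)) := by
  induction l generalizing t with
  | nil => simp [pvBCount]
  | cons p rest ih =>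
    simp only [pvBCount]
    by_cases h : t + pvWC p ≤ ow
    · simp only [h, if_pos]
      obtain ⟨ih1, ih2, ih3⟩ := ih (t + pvWC p)
      refine ⟨by simp; omega, ?_, ?_⟩
      · right
        have : pvP (p :: rest) (pvBCount ow rest (t + pvWC p) + 1)
            = pvWC p + pvP rest (pvBCount ow rest (t + pvWC p)) := by
          simp [pvP, List.take_succ_cons]
        rw [this]
        rcases ih2 with h0 | h2
        · rw [h0]; simpa [pvP_zero] using h
        · omega
      · rcases ih3 with h0 | h3
        · left; simp [h0]
        · right
          have : pvP (p :: rest) (pvBCount ow rest (t + pvWC p) + 1 + 1)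
              = pvWC p + pvP rest (pvBCount ow rest (t + pvWC p) + 1) := by
            simp [pvP, List.take_succ_cons]
          rw [this]; omega
    · simp only [h, if_neg, not_false_iff]
      refine ⟨by simp, by simp, Or.inr ?_⟩
      push_neg at h
      simpa [pvP, List.take_succ_cons, pvP_zero] using h

-- A's greedy loop in closed form: take from the reversed list, then flip back
theorem pvALoop_acc (ow : Int) (l : List String) (acc : List String) (wc : Int) :
    pvALoop ow l acc wc = pvALoop ow l [] wc ++ acc := by
  induction l generalizing acc wc with
  | nil => simp [pvALoop]
  | cons p rest ih =>
    simp only [pvALoop]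
    split_ifs with h
    · rw [ih, ih [p]]; simp
    · simp

theorem pvALoop_eq_take (ow : Int) (l : List String) (wc : Int) :
    pvALoop ow l [] wc = (l.take (pvBCount ow l wc)).reverse := by
  induction l generalizing wc with
  | nil => simp [pvALoop, pvBCount]
  | cons p rest ih =>
    simp only [pvALoop, pvBCount]
    split_ifs with h
    · rw [pvALoop_acc, ih]; simp
    · simp

-- cumulative word count from the end, expressed through prefix sums of the original list
theorem pvP_reverse (l : List String) (j : Nat) (hj : j ≤ l.length) :
    pvP l.reverse j = pvP l l.length - pvP l (l.length - j) := by
  have h1 : l.reverse.take j = (l.drop (l.length - j)).reverse := by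
    rw [List.take_reverse]
  have h2 : pvP l l.length = pvP l (l.length - j) + ((l.drop (l.length - j)).map pvWC).sum := by
    conv_lhs => rw [pvP, List.take_of_length_le (le_refl _), ← List.take_append_drop (l.length - j) l]
    simp [pvP, List.map_append, List.sum_append, List.take_append_drop]
  unfold pvP
  rw [h1, List.map_reverse, List.sum_reverse]
  unfold pvP at h2
  omega

-- ===== VERDICT (by name: the statement is the Claim_ definition above) =====
theorem get_overlap_paragraphs_py_spec : Claim_equal_get_overlap_paragraphs_py := by
  intro L ow _
  unfold Spec_get_overlap_paragraphs_py get_overlap_paragraphs_py get_overlap_paragraphs_py_alt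
  set n := L.length with hn
  set pref := List.scanl (fun s p => s + pvWC p) 0 L with hpref
  have hlen : pref.length = n + 1 := by rw [hpref, List.length_scanl, hn]
  have hgetD : ∀ j, j ≤ n → pref.getD j 0 = pvP L j := by
    intro j hj
    rw [hpref, pvScanl_getD L 0 j (by omega)]; ring
  have htotal : pref.getD (pref.length - 1) 0 = pvP L n := by
    rw [hlen]; simpa using hgetD n (le_refl n)
  set x := pref.getD (pref.length - 1) 0 - ow with hx
  have hmono : ∀ i j, i ≤ j → j < pref.length → pref.getD i 0 ≤ pref.getD j 0 := by
    intro i j hij hjl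
    rw [hgetD i (by omega), hgetD j (by omega)]
    exact pvP_mono L hij
  obtain ⟨hr1, hr2, hr3⟩ := pvBisect_spec pref x hmono 0 pref.length (le_refl _) (by omega)
    (by omega) (by intro j h1 h2; omega)
  set r := pvBisectLeft pref x 0 pref.length with hr
  set k := pvBCount ow L.reverse 0 with hk
  obtain ⟨hk1, hk2, hk3⟩ := pvBCount_spec ow L.reverse 0
  rw [← hk] at hk1 hk2 hk3
  rw [List.length_reverse] at hk1 hk3
  show pvALoop ow L.reverse [] 0 = L.drop r
  rw [pvALoop_eq_take, List.take_reverse, List.reverse_reverse, ← hk]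
  -- kept condition, in prefix-sum form:  cum k ≤ ow  ↔  x ≤ pvP L (n - k)
  have hcum : ∀ j, j ≤ n → (0 + pvP L.reverse j ≤ ow ↔ x ≤ pvP L (n - j)) := by
    intro j hj
    rw [pvP_reverse L j (by omega), hx, htotal, ← hn]
    constructor <;> intro <;> omega
  rw [hlen] at hr3
  -- show the two drop indices cut the same suffix
  by_cases hcase : r ≤ n
  · have hrk : n - k = r := by
      by_contra hne
      rcases Nat.lt_or_ge (n - k) r with hlt | hge
      · -- n - k < r : pref[n-k] < x, forcing k = 0 and then pvP L n < x, contradicting r ≤ n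
        have h1 : pvP L (n - k) < x := by
          have := hr1 (n - k) hlt
          rwa [hgetD (n - k) (by omega)] at this
        have hk0 : k = 0 := by
          rcases hk2 with h0 | h2
          · exact h0
          · exfalso; rw [hcum k hk1] at h2; omega
        rw [hk0, Nat.sub_zero] at h1
        have h2 : x ≤ pvP L n := by
          have := hr2 n (by omega) (by omega)
          rwa [hgetD n (le_refl n)] at this
        omega
      · -- r < n - k : k ≠ n, so cum (k+1) > ow, i.e. pref[n-k-1] < x; but r ≤ n-k-1 gives x ≤ it
        have hlt2 : r < n - k := by omega
        have hkn : k ≠ n := by omega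
        rcases hk3 with h0 | h3
        · exact hkn h0
        · have h3' : ¬ (0 + pvP L.reverse (k + 1) ≤ ow) := by omega
          rw [hcum (k + 1) (by omega)] at h3'
          have h4 : x ≤ pvP L (n - (k + 1)) := by
            have := hr2 (n - (k + 1)) (by omega) (by omega)
            rwa [hgetD (n - (k + 1)) (by omega)] at this
          omega
    rw [hrk]
  · -- r = n + 1 : pref[n] < x so ow < 0, k = 0, and both drops are past the end
    have hreq : r = n + 1 := by omega
    have h1 : pvP L n < x := by
      have := hr1 n (by omega)
      rwa [hgetD n (le_refl n)] at this
    have hk0 : k = 0 := by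
      rcases hk2 with h0 | h2
      · exact h0
      · exfalso
        rw [hcum k hk1] at h2
        have := pvP_mono L (Nat.sub_le n k)
        omega
    rw [hk0, Nat.sub_zero, hreq, List.drop_of_length_le (by omega), List.drop_of_length_le (by omega)]
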